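-- pv_equiv track=rewrite | github.com/cmaceves/context_schema_agent | scripts/tools/schema_tools.py | _clean_vocabularies
-- ===== SOURCE A (Python) =====
-- MAX_VOCAB_SIZE = 30
--
-- NULL_LIKE_TERMS = frozenset({
--     "not_applicable", "unknown", "none", "not_specified",
--     "none_known", "unclassified", "other", "n/a", "na",
--     "not_a_drug", "not_organism_specific",
-- })
--
-- def is_null_like(term: str) -> bool:
--     """Check if a vocabulary term is a null-like placeholder."""
--     if term is None:
--         return True
--     return term.lower().strip() in NULL_LIKE_TERMS
--
-- def normalize_term(term: str) -> str:
--     """Lowercase a term and replace spaces with underscores."""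
--     return term.strip().lower().replace(" ", "_")
--
-- def _clean_vocabularies(schema: dict) -> list[str]:
--     """Normalize terms, remove null-like terms, and enforce term cap.
--
--     Modifies schema in-place. Returns a list of warning strings.
--     """
--     warnings = []
--     vocabs = schema.get("controlled_vocabularies", {})
--     for vocab_name, terms in vocabs.items():
--         # Normalize all terms
--         normalized = [normalize_term(t) for t in terms]
--         # Remove null-like terms
--         cleaned = [t for t in normalized if not is_null_like(t)]
--         # Deduplicate (normalization may create duplicates)
--         seen = set()
--         deduped = []
--         for t in cleaned:
--             if t not in seen:
--                 seen.add(t)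
--                 deduped.append(t)
--         cleaned = deduped
--         removed_nulls = sorted(set(normalized) - set(cleaned) - set(t for t in normalized if is_null_like(t)))
--         stripped_nulls = [t for t in normalized if is_null_like(t)]
--         if stripped_nulls:
--             warnings.append(
--                 f"{vocab_name}: stripped null-like terms: {sorted(set(stripped_nulls))}"
--             )
--         # Enforce cap
--         if len(cleaned) > MAX_VOCAB_SIZE:
--             overflow = cleaned[MAX_VOCAB_SIZE:]
--             warnings.append(
--                 f"{vocab_name}: truncated from {len(cleaned)} to {MAX_VOCAB_SIZE} "
--                 f"(dropped: {[t for t in overflow]})"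
--             )
--             cleaned = cleaned[:MAX_VOCAB_SIZE]
--         vocabs[vocab_name] = cleaned
--     return warnings
-- ===== SOURCE B (Python) =====
-- MAX_VOCAB_SIZE = 30
--
-- NULL_LIKE_TERMS = frozenset({
--     "not_applicable", "unknown", "none", "not_specified",
--     "none_known", "unclassified", "other", "n/a", "na",
--     "not_a_drug", "not_organism_specific",
-- })
--
-- def is_null_like(term: str) -> bool:
--     if term is None:
--         return True
--     return term.lower().strip() in NULL_LIKE_TERMS
--
-- def normalize_term(term: str) -> str:
--     return term.strip().lower().replace(" ", "_")
--
-- def _clean_vocabularies(schema: dict) -> list[str]: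
--     """Single pass per vocabulary: normalize, route null-likes aside, dedupe on the fly."""
--     warnings = []
--     vocabs = schema.get("controlled_vocabularies", {})
--     for vocab_name, terms in vocabs.items():
--         stripped_nulls = []
--         seen = set()
--         deduped = []
--         for t in terms:
--             nt = normalize_term(t)
--             if is_null_like(nt):
--                 stripped_nulls.append(nt)
--             elif nt not in seen:
--                 seen.add(nt)
--                 deduped.append(nt)
--         if stripped_nulls:
--             warnings.append(
--                 f"{vocab_name}: stripped null-like terms: {sorted(set(stripped_nulls))}"
--             )
--         if len(deduped) > MAX_VOCAB_SIZE:
--             overflow = deduped[MAX_VOCAB_SIZE:]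
--             warnings.append(
--                 f"{vocab_name}: truncated from {len(deduped)} to {MAX_VOCAB_SIZE} "
--                 f"(dropped: {[t for t in overflow]})"
--             )
--             deduped = deduped[:MAX_VOCAB_SIZE]
--         vocabs[vocab_name] = deduped
--     return warnings
-- ===== Notes on version B (the rewrite author's own statement) =====
-- stated objective: simpler
-- what changed: The three per-vocabulary passes (normalize-all, filter null-likes, dedupe loop) plus the unused removed_nulls set computation are fused into one loop that normalizes each term and routes it either to the stripped-nulls list or, guarded by a seen set, to the deduped result; warnings and the cap are unchanged.
import Mathlib
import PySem

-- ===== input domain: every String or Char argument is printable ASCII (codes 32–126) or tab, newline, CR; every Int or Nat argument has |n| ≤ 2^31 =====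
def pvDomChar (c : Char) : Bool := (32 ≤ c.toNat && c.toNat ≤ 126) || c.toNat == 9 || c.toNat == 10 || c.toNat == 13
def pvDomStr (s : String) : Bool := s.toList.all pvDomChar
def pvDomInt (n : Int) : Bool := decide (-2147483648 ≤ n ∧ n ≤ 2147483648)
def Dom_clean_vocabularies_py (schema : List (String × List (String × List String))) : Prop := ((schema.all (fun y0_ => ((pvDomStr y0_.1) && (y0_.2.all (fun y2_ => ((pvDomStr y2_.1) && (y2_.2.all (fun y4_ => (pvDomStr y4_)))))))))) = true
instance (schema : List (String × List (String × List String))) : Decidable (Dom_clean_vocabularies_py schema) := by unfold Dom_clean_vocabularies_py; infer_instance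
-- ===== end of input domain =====

-- B fuses A's three per-vocabulary passes (normalize-all, filter null-likes, dedupe loop) into one
-- loop and drops the unused removed_nulls computation; warnings and order are identical (objective:
-- simpler). Both Pythons also mutate schema's inner dict identically; the theorems here are about
-- the RETURN value (the warning list) only.

-- ----- shared module-level helpers (Python's module constants / helper functions) -----
def nullLikeTerms : List String :=
  ["not_applicable", "unknown", "none", "not_specified",
   "none_known", "unclassified", "other", "n/a", "na",
   "not_a_drug", "not_organism_specific"]

-- normalize_term: term.strip().lower().replace(" ", "_")
def pyNormalize (t : String) : String :=
  PySem.Str.replace (PySem.Str.lower (PySem.Str.strip t)) " " "_"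

-- is_null_like: term.lower().strip() in NULL_LIKE_TERMS  (term is never None here: str input)
def pyIsNullLike (t : String) : Bool :=
  nullLikeTerms.contains (PySem.Str.strip (PySem.Str.lower t))

-- Python repr of one str (exact for our ASCII+tab/newline/CR domain): backslash/tab/newline/CR
-- escaped; quote is '"' iff the string contains a single quote and no double quote, else '\''.
def pyReprChar (q : Char) (c : Char) : String :=
  if c = '\\' then "\\\\"
  else if c = '\t' then "\\t"
  else if c = '\n' then "\\n"
  else if c = '\r' then "\\r"
  else if c = q then String.ofList ['\\', q]
  else String.ofList [c]

def pyReprStr (s : String) : String :=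
  let l := s.toList
  let q : Char := if l.contains '\'' && !(l.contains '"') then '"' else '\''
  String.ofList [q] ++ String.join (l.map (pyReprChar q)) ++ String.ofList [q]

-- Python repr of a list of str, as an f-string renders it
def pyReprStrList (xs : List String) : String :=
  "[" ++ String.intercalate ", " (xs.map pyReprStr) ++ "]"

-- f"{name}: stripped null-like terms: {sorted(set(stripped))}"
def warnStripped (name : String) (stripped : List String) : String :=
  name ++ ": stripped null-like terms: " ++
    pyReprStrList (PySem.List.sorted (PySem.Set.ofList stripped) id false)

-- f"{name}: truncated from {n} to 30 (dropped: {overflow})"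
def warnTrunc (name : String) (n : Nat) (overflow : List String) : String :=
  name ++ ": truncated from " ++ PySem.Int.toStr (n : Int) ++ " to 30 (dropped: " ++
    pyReprStrList overflow ++ ")"

-- schema.get("controlled_vocabularies", {})
def getVocabs (schema : List (String × List (String × List String))) :
    List (String × List String) :=
  ((schema.find? (fun p => p.1 == "controlled_vocabularies")).map (·.2)).getD []

-- ===== PORT A =====
-- A's dedup loop over `cleaned` with a `seen` set and a `deduped` accumulator
def dedupStepA (st : PySem.Set String × List String) (t : String) :
    PySem.Set String × List String :=
  if st.1.contains t then st else (st.1.add t, st.2 ++ [t])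

def clean_vocabularies_py (schema : List (String × List (String × List String))) : List String :=
  let vocabs := getVocabs schema
  vocabs.foldl (fun warnings p =>
    let normalized := p.2.map pyNormalize
    let cleaned := normalized.filter (fun t => !pyIsNullLike t)
    let dd := cleaned.foldl dedupStepA (PySem.Set.empty, [])
    let cleaned := dd.2
    -- removed_nulls (computed by A, never used): sorted(set(normalized)-set(cleaned)-set(nulls))
    let _removed_nulls := PySem.List.sorted
      ((PySem.Set.ofList normalized).filter
        (fun t => !cleaned.contains t && !pyIsNullLike t)) id false
    let strippedNulls := normalized.filter pyIsNullLike
    let warnings := if strippedNulls ≠ [] then warnings ++ [warnStripped p.1 strippedNulls]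
                    else warnings
    if cleaned.length > 30 then
      warnings ++ [warnTrunc p.1 cleaned.length (PySem.List.slice cleaned (some 30) none)]
    else warnings) []

-- ===== PORT B =====
-- B's single per-vocabulary pass: state = (stripped_nulls, seen, deduped)
def fuseStepB (st : List String × PySem.Set String × List String) (t : String) :
    List String × PySem.Set String × List String :=
  let nt := pyNormalize t
  if pyIsNullLike nt then (st.1 ++ [nt], st.2.1, st.2.2)
  else if st.2.1.contains nt then st
  else (st.1, st.2.1.add nt, st.2.2 ++ [nt])

def clean_vocabularies_py_alt (schema : List (String × List (String × List String))) :
    List String :=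
  let vocabs := getVocabs schema
  vocabs.foldl (fun warnings p =>
    let st := p.2.foldl fuseStepB ([], PySem.Set.empty, [])
    let warnings := if st.1 ≠ [] then warnings ++ [warnStripped p.1 st.1] else warnings
    if st.2.2.length > 30 then
      warnings ++ [warnTrunc p.1 st.2.2.length (PySem.List.slice st.2.2 (some 30) none)]
    else warnings) []

-- ===== PRECONDITION & SPEC =====
def Spec_clean_vocabularies_py (schema : List (String × List (String × List String))) (out : List String) : Prop := out = clean_vocabularies_py_alt schema
instance (schema : List (String × List (String × List String))) (out : List String) : Decidable (Spec_clean_vocabularies_py schema out) := by unfold Spec_clean_vocabularies_py; infer_instance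

-- ===== CLAIM (what is proved, stated in full; the proofs are below) =====
def Claim_equal_clean_vocabularies_py : Prop := ∀ (schema : List (String × List (String × List String))), Dom_clean_vocabularies_py schema → Spec_clean_vocabularies_py schema (clean_vocabularies_py schema)

-- ===== LEMMAS AND PROOFS =====

-- B's fused pass = A's null-filter pass plus A's dedup fold over the non-null normalized terms
lemma fuse_eq (terms : List String) (a : List String) (s : PySem.Set String) (d : List String) :
    terms.foldl fuseStepB (a, s, d)
      = (a ++ (terms.map pyNormalize).filter pyIsNullLike,
         ((terms.map pyNormalize).filter (fun t => !pyIsNullLike t)).foldl dedupStepA (s, d)) := by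
  induction terms generalizing a s d with
  | nil => simp
  | cons t ts ih =>
    simp only [List.foldl_cons, List.map_cons, fuseStepB]
    by_cases h : pyIsNullLike (pyNormalize t)
    · simp [h, ih]
    · by_cases hs : pyNormalize t ∈ s
      · simp [h, hs, ih, dedupStepA]
      · simp [h, hs, ih, dedupStepA]

-- the two per-vocabulary bodies are the same function of (warnings, (name, terms))
lemma body_eq (warnings : List String) (p : String × List String) :
    (let normalized := p.2.map pyNormalize
     let cleaned := normalized.filter (fun t => !pyIsNullLike t)
     let dd := cleaned.foldl dedupStepA (PySem.Set.empty, [])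
     let cleaned := dd.2
     let _removed_nulls := PySem.List.sorted
       ((PySem.Set.ofList normalized).filter
         (fun t => !cleaned.contains t && !pyIsNullLike t)) id false
     let warnings := if (normalized.filter pyIsNullLike) ≠ [] then
         warnings ++ [warnStripped p.1 (normalized.filter pyIsNullLike)] else warnings
     if cleaned.length > 30 then
       warnings ++ [warnTrunc p.1 cleaned.length (PySem.List.slice cleaned (some 30) none)]
     else warnings)
    = (let st := p.2.foldl fuseStepB ([], PySem.Set.empty, [])
       let warnings := if st.1 ≠ [] then warnings ++ [warnStripped p.1 st.1] else warnings
       if st.2.2.length > 30 then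
         warnings ++ [warnTrunc p.1 st.2.2.length (PySem.List.slice st.2.2 (some 30) none)]
       else warnings) := by
  simp only [fuse_eq, List.nil_append]

-- ===== VERDICT (by name: the statement is the Claim_ definition above) =====
theorem clean_vocabularies_py_spec : Claim_equal_clean_vocabularies_py := by
  intro schema _
  show clean_vocabularies_py schema = clean_vocabularies_py_alt schema
  exact congrFun (congrArg (fun f => List.foldl f ([] : List String))
    (funext fun warnings => funext fun p => body_eq warnings p)) (getVocabs schema)
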